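-- pv_equiv track=rewrite | github.com/skier-song9/extractive-summarization | src/summarization/benchmark/metrics.py | extractive_fragment_lengths
-- ===== SOURCE A (Python) =====
-- from collections import defaultdict
--
-- def extractive_fragment_lengths(source_tokens: list[str], summary_tokens: list[str]) -> list[int]:
--     source_index: dict[str, list[int]] = defaultdict(list)
--     for index, token in enumerate(source_tokens):
--         source_index[token].append(index)
--
--     fragment_lengths: list[int] = []
--     summary_idx = 0
--     while summary_idx < len(summary_tokens):
--         best_length = 0
--         for source_idx in source_index.get(summary_tokens[summary_idx], []):
--             match_length = 0
--             while (
--                 summary_idx + match_length < len(summary_tokens)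
--                 and source_idx + match_length < len(source_tokens)
--                 and summary_tokens[summary_idx + match_length] == source_tokens[source_idx + match_length]
--             ):
--                 match_length += 1
--             if match_length > best_length:
--                 best_length = match_length
--
--         if best_length > 0:
--             fragment_lengths.append(best_length)
--             summary_idx += best_length
--         else:
--             summary_idx += 1
--
--     return fragment_lengths
-- ===== SOURCE B (Python) =====
-- def extractive_fragment_lengths(source_tokens: list[str], summary_tokens: list[str]) -> list[int]:
--     # Dynamic programming over longest-common-extension rows, computed
--     # back-to-front over the summary, then a single greedy jump pass.
--     n = len(source_tokens)
--     best = []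
--     next_row = [0] * (n + 1)
--     for t in reversed(summary_tokens):
--         row = [next_row[j + 1] + 1 if source_tokens[j] == t else 0 for j in range(n)]
--         row.append(0)
--         best.append(max(row))
--         next_row = row
--     best.reverse()
--     out = []
--     i = 0
--     m = len(summary_tokens)
--     while i < m:
--         b = best[i]
--         if b > 0:
--             out.append(b)
--             i += b
--         else:
--             i += 1
--     return out
-- ===== Notes on version B (the rewrite author's own statement) =====
-- stated objective: alternative
-- what changed: Replaces the per-position scan over an inverted index with inner token-by-token rematching by a dynamic-programming table of longest-common-extension rows built in one backward pass over the summary (row[j] = next_row[j+1]+1 on a token match), followed by a single greedy jump pass over the precomputed per-position maxima.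
import Mathlib
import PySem

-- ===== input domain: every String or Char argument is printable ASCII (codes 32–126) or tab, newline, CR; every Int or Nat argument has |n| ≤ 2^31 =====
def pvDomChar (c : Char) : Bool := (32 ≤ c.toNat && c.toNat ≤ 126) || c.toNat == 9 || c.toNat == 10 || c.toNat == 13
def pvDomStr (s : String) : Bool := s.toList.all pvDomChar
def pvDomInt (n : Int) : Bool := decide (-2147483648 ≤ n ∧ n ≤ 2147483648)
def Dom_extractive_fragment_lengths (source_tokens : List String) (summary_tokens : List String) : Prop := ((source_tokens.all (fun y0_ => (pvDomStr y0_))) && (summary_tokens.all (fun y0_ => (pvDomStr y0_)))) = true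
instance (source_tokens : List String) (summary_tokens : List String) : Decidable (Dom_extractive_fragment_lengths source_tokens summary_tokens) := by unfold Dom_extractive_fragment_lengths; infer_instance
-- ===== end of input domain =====

-- B replaces A's inverted-index + per-occurrence rematching with a backward DP of
-- longest-common-extension rows plus one greedy jump pass (alternative algorithm, same results).

-- ===== PORT A =====
-- inner `while` of A: extends a match of current length ml at source index si / summary index qi
def efl_match (src sum : List String) (si : Int) (qi ml : Nat) : Nat :=
  if h : qi + ml < sum.length ∧ si + (ml : Int) < (src.length : Int) ∧
      PySem.List.pyGetD sum ((qi : Int) + (ml : Int)) "" = PySem.List.pyGetD src (si + (ml : Int)) "" then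
    efl_match src sum si qi (ml + 1)
  else ml
termination_by sum.length - (qi + ml)
decreasing_by omega

-- inner `for source_idx in source_index.get(...)` loop of A: best match length at qi
def efl_bestAt (src sum : List String) (d : PySem.Dict String (List Int)) (qi : Nat) : Nat :=
  (d.getD (PySem.List.pyGetD sum (qi : Int) "") []).foldl
    (fun b si => let ml := efl_match src sum si qi 0; if ml > b then ml else b) 0

-- outer `while summary_idx < len(summary_tokens)` of A
def efl_loop (src sum : List String) (d : PySem.Dict String (List Int)) (qi : Nat) : List Int :=
  if h : qi < sum.length then
    let best := efl_bestAt src sum d qi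
    if hb : best > 0 then (best : Int) :: efl_loop src sum d (qi + best) else efl_loop src sum d (qi + 1)
  else []
termination_by sum.length - qi
decreasing_by all_goals omega

def extractive_fragment_lengths (source_tokens : List String) (summary_tokens : List String) : List Int :=
  let source_index := (PySem.List.enumerate source_tokens 0).foldl
    (fun d p => d.modify p.2 [] (fun l => l ++ [p.1])) PySem.Dict.empty
  efl_loop source_tokens summary_tokens source_index 0

-- ===== PORT B =====
-- one DP row: row[j] = next[j+1]+1 if src[j] == t else 0, with a trailing 0 sentinel
def efl_mkRow (src : List String) (t : String) (next : List Nat) : List Nat :=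
  match src with
  | [] => [0]
  | s :: ss => (if s = t then next.tail.headD 0 + 1 else 0) :: efl_mkRow ss t next.tail

-- backward pass over the summary: returns (per-position maxima, current row)
def efl_dp (src : List String) : List String → List Nat × List Nat
  | [] => ([], List.replicate (src.length + 1) 0)
  | t :: rest =>
    let p := efl_dp src rest
    let row := efl_mkRow src t p.2
    (row.foldl max 0 :: p.1, row)

-- greedy jump pass over the precomputed best lengths
def efl_jump (best : List Nat) (i : Nat) : List Int :=
  if h : i < best.length then
    let b := best.getD i 0
    if hb : b > 0 then (b : Int) :: efl_jump best (i + b) else efl_jump best (i + 1)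
  else []
termination_by best.length - i
decreasing_by all_goals omega

def extractive_fragment_lengths_alt (source_tokens : List String) (summary_tokens : List String) : List Int :=
  efl_jump (efl_dp source_tokens summary_tokens).1 0

-- ===== PRECONDITION & SPEC =====
def Spec_extractive_fragment_lengths (source_tokens : List String) (summary_tokens : List String) (out : List Int) : Prop := out = extractive_fragment_lengths_alt source_tokens summary_tokens
instance (source_tokens : List String) (summary_tokens : List String) (out : List Int) : Decidable (Spec_extractive_fragment_lengths source_tokens summary_tokens out) := by unfold Spec_extractive_fragment_lengths; infer_instance

-- ===== CLAIM (what is proved, stated in full; the proofs are below) =====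
def Claim_equal_extractive_fragment_lengths : Prop := ∀ (source_tokens : List String) (summary_tokens : List String), Dom_extractive_fragment_lengths source_tokens summary_tokens → Spec_extractive_fragment_lengths source_tokens summary_tokens (extractive_fragment_lengths source_tokens summary_tokens)

-- ===== LEMMAS AND PROOFS =====

-- longest common prefix length of two token lists
def efl_lcp : List String → List String → Nat
  | x :: xs, y :: ys => if x = y then efl_lcp xs ys + 1 else 0
  | _, _ => 0

-- the intended value of a DP row: lcp of every suffix of src against q, plus a trailing 0
def efl_specRow (src : List String) (q : List String) : List Nat :=
  match src with
  | [] => [0]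
  | s :: ss => efl_lcp (s :: ss) q :: efl_specRow ss q

def efl_best (src q : List String) : Nat := (efl_specRow src q).foldl max 0

lemma efl_lcp_nil_right (xs : List String) : efl_lcp xs [] = 0 := by
  cases xs <;> rfl

lemma efl_specRow_nil (src : List String) : efl_specRow src [] = List.replicate (src.length + 1) 0 := by
  induction src with
  | nil => rfl
  | cons s ss ih => simp [efl_specRow, efl_lcp_nil_right, ih, List.replicate_succ]

lemma efl_specRow_headD (src q : List String) : (efl_specRow src q).headD 0 = efl_lcp src q := by
  cases src <;> simp [efl_specRow, efl_lcp]

lemma efl_mkRow_spec (src : List String) (t : String) (rest : List String) :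
    efl_mkRow src t (efl_specRow src rest) = efl_specRow src (t :: rest) := by
  induction src with
  | nil => rfl
  | cons s ss ih =>
    simp only [efl_mkRow, efl_specRow, List.tail_cons, ih, efl_specRow_headD]
    rfl

lemma efl_dp_snd (src q : List String) : (efl_dp src q).2 = efl_specRow src q := by
  induction q with
  | nil => simp [efl_dp, efl_specRow_nil]
  | cons t rest ih => simp [efl_dp, ih, efl_mkRow_spec]

lemma efl_dp_fst_length (src q : List String) : (efl_dp src q).1.length = q.length := by
  induction q with
  | nil => rfl
  | cons t rest ih => simp [efl_dp, ih]

lemma efl_dp_fst_getD (src : List String) :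
    ∀ (q : List String) (i : Nat), i < q.length →
      (efl_dp src q).1.getD i 0 = efl_best src (q.drop i) := by
  intro q
  induction q with
  | nil => intro i h; simp at h
  | cons t rest ih =>
    intro i h
    cases i with
    | zero => simp [efl_dp, efl_dp_snd, efl_mkRow_spec, efl_best]
    | succ j => simpa [efl_dp] using ih j (by simpa using h)

lemma efl_match_eq (src sum : List String) (qi j : Nat) :
    ∀ (fuel ml : Nat), sum.length - (qi + ml) ≤ fuel →
      efl_match src sum (j : Int) qi ml = ml + efl_lcp (src.drop (j + ml)) (sum.drop (qi + ml)) := by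
  intro fuel
  induction fuel with
  | zero =>
    intro ml hf
    rw [efl_match, dif_neg (by omega)]
    rw [List.drop_eq_nil_of_le (by omega : sum.length ≤ qi + ml), efl_lcp_nil_right]
    omega
  | succ n ihn =>
    intro ml hf
    rw [efl_match]
    split_ifs with hg
    · obtain ⟨h1, h2, h3⟩ := hg
      have h2' : j + ml < src.length := by exact_mod_cast (by push_cast at h2 ⊢; omega : ((j + ml : Nat) : Int) < (src.length : Int))
      rw [ihn (ml + 1) (by omega)]
      rw [List.drop_eq_getElem_cons h2', List.drop_eq_getElem_cons h1]
      have h3' : src[j + ml] = sum[qi + ml] := by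
        have := h3
        rw [show ((qi : Int) + (ml : Int)) = ((qi + ml : Nat) : Int) by push_cast; ring,
            show ((j : Int) + (ml : Int)) = ((j + ml : Nat) : Int) by push_cast; ring] at this
        rw [PySem.List.pyGetD_natCast, PySem.List.pyGetD_natCast,
            List.getD_eq_getElem _ _ h1, List.getD_eq_getElem _ _ h2'] at this
        exact this.symm
      rw [efl_lcp, if_pos h3']
      rw [show j + (ml + 1) = j + ml + 1 from by omega, show qi + (ml + 1) = qi + ml + 1 from by omega]
      omega
    · push Not at hg
      by_cases hq : qi + ml < sum.length
      · by_cases hj : j + ml < src.length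
        · have h3 := hg hq (by exact_mod_cast (show ((j + ml : Nat) : Int) < (src.length : Int) by exact_mod_cast hj))
          rw [List.drop_eq_getElem_cons hj, List.drop_eq_getElem_cons hq, efl_lcp, if_neg]
          · omega
          · intro he
            apply h3
            rw [show ((qi : Int) + (ml : Int)) = ((qi + ml : Nat) : Int) by push_cast; ring,
                show ((j : Int) + (ml : Int)) = ((j + ml : Nat) : Int) by push_cast; ring,
                PySem.List.pyGetD_natCast, PySem.List.pyGetD_natCast,
                List.getD_eq_getElem _ _ hq, List.getD_eq_getElem _ _ hj]
            exact he.symm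
        · rw [List.drop_eq_nil_of_le (by omega : src.length ≤ j + ml)]
          simp [efl_lcp]
      · rw [List.drop_eq_nil_of_le (by omega : sum.length ≤ qi + ml), efl_lcp_nil_right]
        omega

lemma efl_dict_getD (src : List String) (t : String) :
    ((PySem.List.enumerate src 0).foldl (fun d p => d.modify p.2 [] (fun l => l ++ [p.1]))
        PySem.Dict.empty).getD t []
    = ((PySem.List.enumerate src 0).filter (fun p => p.2 == t)).map (·.1) := by
  have h1 : (PySem.List.enumerate src 0).foldl (fun d p => d.modify p.2 [] (fun l => l ++ [p.1]))
        (PySem.Dict.empty : PySem.Dict String (List Int))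
      = ((PySem.List.enumerate src 0).map (fun p => (p.2, p.1))).foldl
          (fun d p => d.modify p.1 [] (fun l => l ++ [p.2])) PySem.Dict.empty := by
    rw [List.foldl_map]
  rw [h1, PySem.Dict.getD_foldl_modify_append]
  simp [List.filter_map, List.map_map, Function.comp_def]

lemma efl_fold_occ (t : String) (q : List String) (g : Int → Nat) :
    ∀ (src : List String) (s : Nat),
      (∀ k : Nat, k < src.length → g ((s : Int) + (k : Int)) = efl_lcp (src.drop k) (t :: q)) →
      ∀ acc : Nat,
        (((PySem.List.enumerate src (s : Int)).filter (fun p => p.2 == t)).map (·.1)).foldl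
            (fun b si => max b (g si)) acc
          = (efl_specRow src (t :: q)).foldl max acc := by
  intro src
  induction src with
  | nil =>
    intro s hg acc
    simp [PySem.List.enumerate_nil, efl_specRow]
  | cons x xs ih =>
    intro s hg acc
    rw [PySem.List.enumerate_cons]
    have hs1 : ((s : Int) + 1) = (((s + 1 : Nat)) : Int) := by push_cast; ring
    have hg' : ∀ k : Nat, k < xs.length →
        g (((s + 1 : Nat) : Int) + (k : Int)) = efl_lcp (xs.drop k) (t :: q) := by
      intro k hk
      have := hg (k + 1) (by simp; omega)
      rw [show ((s : Int) + ((k + 1 : Nat) : Int)) = (((s + 1 : Nat) : Int) + (k : Int)) by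
        push_cast; ring] at this
      simpa using this
    by_cases hx : x = t
    · have hfilt : (x == t) = true := by simp [hx]
      simp only [List.filter_cons, hfilt, if_true, List.map_cons, List.foldl_cons]
      rw [hs1, ih (s + 1) hg']
      have h0 := hg 0 (by simp)
      simp only [Nat.cast_zero, add_zero, List.drop_zero] at h0
      simp [efl_specRow, h0]
    · have hfilt : (x == t) = false := by simp [hx]
      simp only [List.filter_cons, hfilt, Bool.false_eq_true, if_false]
      rw [hs1, ih (s + 1) hg']
      have hlz : efl_lcp (x :: xs) (t :: q) = 0 := by rw [efl_lcp, if_neg hx]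
      simp [efl_specRow, hlz]

lemma efl_bestAt_eq (src sum : List String) (qi : Nat) (h : qi < sum.length) :
    efl_bestAt src sum
        ((PySem.List.enumerate src 0).foldl (fun d p => d.modify p.2 [] (fun l => l ++ [p.1]))
          PySem.Dict.empty) qi
      = efl_best src (sum.drop qi) := by
  unfold efl_bestAt
  rw [PySem.List.pyGetD_natCast, List.getD_eq_getElem _ _ h, efl_dict_getD]
  have hf : (fun (b : Nat) (si : Int) =>
        let ml := efl_match src sum si qi 0; if ml > b then ml else b)
      = (fun (b : Nat) (si : Int) => max b (efl_match src sum si qi 0)) := by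
    funext b si
    simp only [Nat.max_def]
    split_ifs <;> omega
  rw [hf]
  rw [efl_best, List.drop_eq_getElem_cons h]
  apply efl_fold_occ sum[qi] (sum.drop (qi + 1)) (fun si => efl_match src sum si qi 0) src 0
  intro k hk
  simp only [Nat.cast_zero, zero_add]
  rw [efl_match_eq src sum qi k sum.length 0 (by omega)]
  rw [Nat.add_zero, Nat.add_zero, Nat.zero_add, List.drop_eq_getElem_cons h]

lemma efl_loop_eq (src sum : List String) :
    ∀ (n qi : Nat), sum.length - qi ≤ n →
      efl_loop src sum
          ((PySem.List.enumerate src 0).foldl (fun d p => d.modify p.2 [] (fun l => l ++ [p.1]))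
            PySem.Dict.empty) qi
        = efl_jump (efl_dp src sum).1 qi := by
  intro n
  induction n with
  | zero =>
    intro qi hn
    rw [efl_loop, dif_neg (show ¬ qi < sum.length by omega), efl_jump,
        dif_neg (show ¬ qi < (efl_dp src sum).1.length by rw [efl_dp_fst_length]; omega)]
  | succ n ihn =>
    intro qi hn
    rw [efl_loop, efl_jump]
    by_cases hq : qi < sum.length
    · rw [dif_pos hq,
          dif_pos (show qi < (efl_dp src sum).1.length by rw [efl_dp_fst_length]; exact hq)]
      have hbest : efl_bestAt src sum
            ((PySem.List.enumerate src 0).foldl (fun d p => d.modify p.2 [] (fun l => l ++ [p.1]))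
              PySem.Dict.empty) qi
          = (efl_dp src sum).1.getD qi 0 := by
        rw [efl_bestAt_eq src sum qi hq, efl_dp_fst_getD src sum qi hq]
      simp only [hbest]
      split_ifs with hb
      · rw [ihn (qi + (efl_dp src sum).1.getD qi 0) (by omega)]
      · rw [ihn (qi + 1) (by omega)]
    · rw [dif_neg hq,
          dif_neg (show ¬ qi < (efl_dp src sum).1.length by rw [efl_dp_fst_length]; exact hq)]

theorem extractive_fragment_lengths_spec : Claim_equal_extractive_fragment_lengths := by
  intro src sum _
  show extractive_fragment_lengths src sum = extractive_fragment_lengths_alt src sum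
  unfold extractive_fragment_lengths extractive_fragment_lengths_alt
  exact efl_loop_eq src sum sum.length 0 (by omega)
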